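-- pv_equiv track=rewrite | github.com/bxt/Ludus | unilectures.py/src/bxt/unilectures/theoinf/hausaufg02/aufg3.py | ListGetLength
-- ===== SOURCE A (Python) =====
-- def divtwo(x):
--     y=0
--     d=2
--     while (d<=x):
--         y=(y+1)
--         d=((y+y)+2)
--     return y
--
-- def ListGetLength(l):
--     c=-1 # counter fuer 10er
--     while(l>0):
--         quater=divtwo(divtwo(l)) # Division durch 4
--         rest=(l-((quater+quater)+(quater+quater))) # mod 4
--         if(rest == 2): # Rest == 2 <=> 10 am Ende
--             c=(c+1) # Folglich diese 10 zaehlen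
--         l=quater # Fuer naechsten Durchlauf
--     return c
-- ===== SOURCE B (Python) =====
-- def ListGetLength(l):
--     if l <= 0:
--         return -1
--     n = (l.bit_length() + 1) // 2
--     return sum(1 for k in range(n) if (l >> (2 * k)) % 4 == 2) - 1
-- ===== Notes on version B (the rewrite author's own statement) =====
-- stated objective: faster
-- what changed: Replaces A's repeated division loop (with its hand-rolled linear-time halving subroutine) by a single scan over the base-four digit positions: each two-bit group is tested with a shift and a remainder and the hits are summed, the number of groups being derived from the bit length.
import Mathlib
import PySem

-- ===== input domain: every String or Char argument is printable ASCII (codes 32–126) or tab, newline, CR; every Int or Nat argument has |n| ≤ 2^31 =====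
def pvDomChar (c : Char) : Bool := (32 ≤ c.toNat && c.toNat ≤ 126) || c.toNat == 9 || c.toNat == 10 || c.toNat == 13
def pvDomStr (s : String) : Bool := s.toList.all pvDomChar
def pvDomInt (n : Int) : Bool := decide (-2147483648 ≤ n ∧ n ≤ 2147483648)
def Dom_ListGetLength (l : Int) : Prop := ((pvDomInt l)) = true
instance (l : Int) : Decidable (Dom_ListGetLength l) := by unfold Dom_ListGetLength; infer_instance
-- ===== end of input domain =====

-- B counts base-4 digits equal to 2 by scanning bit positions (shift/mod) instead of A's
-- repeated division loop with its hand-rolled linear halving subroutine; asymptotically faster.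

-- ===== PORT A =====
-- divtwo's while loop: at every test the variable d equals y + y + 2 (initially y=0, d=2;
-- d is reassigned to y+y+2 right after y is incremented), so the test is written inlined.
def divtwoGo (x y : Int) : Int :=
  if (y + y) + 2 ≤ x then divtwoGo x (y + 1) else y
termination_by (x - y - y).toNat
decreasing_by omega

def divtwo (x : Int) : Int := divtwoGo x 0

-- Port-internal fact, needed only so the main while-loop's termination can cite it.
theorem divtwoGo_eq (x y : Int) (h1 : 0 ≤ y) (h2 : y + y ≤ x) :
    divtwoGo x y = PySem.Int.floordiv x 2 := by
  by_cases h : (y + y) + 2 ≤ x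
  · rw [divtwoGo, if_pos h]
    exact divtwoGo_eq x (y + 1) (by omega) (by omega)
  · rw [divtwoGo, if_neg h]
    rw [eq_comm, PySem.Int.floordiv_eq_iff_of_pos (by omega)]
    omega
termination_by (x - y - y).toNat
decreasing_by omega

theorem divtwo_eq (x : Int) (hx : 0 ≤ x) : divtwo x = PySem.Int.floordiv x 2 :=
  divtwoGo_eq x 0 le_rfl (by omega)

theorem divtwo_divtwo_lt (l : Int) (h : 0 < l) : divtwo (divtwo l) < l ∧ 0 ≤ divtwo (divtwo l) := by
  have h1 : divtwo l = PySem.Int.floordiv l 2 := divtwo_eq l (by omega)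
  have hb1 := PySem.Int.floordiv_eq_iff_of_pos (a := l) (b := 2) (q := PySem.Int.floordiv l 2) (by omega)
  have hb1' : (PySem.Int.floordiv l 2) * 2 ≤ l ∧ l < (PySem.Int.floordiv l 2 + 1) * 2 := hb1.mp rfl
  have h2 : divtwo (divtwo l) = PySem.Int.floordiv (PySem.Int.floordiv l 2) 2 := by
    rw [h1]; exact divtwo_eq _ (by omega)
  have hb2 := (PySem.Int.floordiv_eq_iff_of_pos (a := PySem.Int.floordiv l 2) (b := 2)
    (q := PySem.Int.floordiv (PySem.Int.floordiv l 2) 2) (by omega)).mp rfl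
  rw [h2]; omega

def goA (l c : Int) : Int :=
  if 0 < l then
    let quater := divtwo (divtwo l)
    let rest := l - ((quater + quater) + (quater + quater))
    goA quater (if rest = 2 then c + 1 else c)
  else c
termination_by l.toNat
decreasing_by
  have := divtwo_divtwo_lt l (by assumption)
  omega

def ListGetLength (l : Int) : Int := goA l (-1)

-- ===== PORT B =====
def ListGetLength_alt (l : Int) : Int :=
  if l ≤ 0 then -1
  else
    let n : Int := PySem.Int.floordiv ((PySem.Int.bitLength l : Int) + 1) 2
    ((PySem.List.pyRange 0 n 1).foldl
      (fun acc k => if PySem.Int.mod (l >>> (2 * k).toNat) 4 = 2 then acc + 1 else acc) 0) - 1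

-- ===== PRECONDITION & SPEC =====
def Spec_ListGetLength (l : Int) (out : Int) : Prop := out = ListGetLength_alt l
instance (l : Int) (out : Int) : Decidable (Spec_ListGetLength l out) := by unfold Spec_ListGetLength; infer_instance

-- ===== CLAIM (what is proved, stated in full; the proofs are below) =====
def Claim_equal_ListGetLength : Prop := ∀ (l : Int), Dom_ListGetLength l → Spec_ListGetLength l (ListGetLength l)

-- ===== LEMMAS AND PROOFS =====

-- number of base-4 digits of m equal to 2
def cnt2 (m : Nat) : Nat :=
  if m = 0 then 0 else (if m % 4 = 2 then 1 else 0) + cnt2 (m / 4)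
termination_by m
decreasing_by omega

theorem cnt2_unfold (m : Nat) : cnt2 m = (if m % 4 = 2 then 1 else 0) + cnt2 (m / 4) := by
  rw [cnt2]
  by_cases h : m = 0
  · subst h; simp [cnt2]
  · rw [if_neg h]

theorem goA_eq (m : Nat) : ∀ c : Int, goA (m : Int) c = c + (cnt2 m : Int) := by
  induction m using Nat.strong_induction_on with
  | _ m ih =>
    intro c
    by_cases h : 0 < (m : Int)
    · rw [goA, if_pos h]
      have hm2 : divtwo (m : Int) = PySem.Int.floordiv (m : Int) 2 := divtwo_eq _ (by omega)
      have hq : divtwo (divtwo (m : Int)) = ((m / 4 : Nat) : Int) := by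
        rw [hm2]
        have : PySem.Int.floordiv (m : Int) 2 = ((m / 2 : Nat) : Int) := by
          exact_mod_cast PySem.Int.floordiv_natCast m 2
        rw [this, divtwo_eq _ (by positivity)]
        have : PySem.Int.floordiv ((m / 2 : Nat) : Int) 2 = ((m / 2 / 2 : Nat) : Int) := by
          exact_mod_cast PySem.Int.floordiv_natCast (m / 2) 2
        rw [this, Nat.div_div_eq_div_mul]
      simp only [hq]
      have hrest : (m : Int) - ((((m / 4 : Nat) : Int) + ((m / 4 : Nat) : Int)) + (((m / 4 : Nat) : Int) + ((m / 4 : Nat) : Int)))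
          = ((m % 4 : Nat) : Int) := by
        have := Nat.div_add_mod m 4
        push_cast
        omega
      rw [hrest]
      have hlt : m / 4 < m := Nat.div_lt_self (by exact_mod_cast h) (by omega)
      rw [ih (m / 4) hlt]
      rw [cnt2_unfold m]
      by_cases h2 : m % 4 = 2
      · rw [if_pos (by exact_mod_cast congrArg (Nat.cast : Nat → Int) h2), if_pos h2]
        push_cast; ring
      · rw [if_neg (by exact_mod_cast fun hh => h2 (by exact_mod_cast hh)), if_neg h2]
        push_cast; ring
    · have hm : m = 0 := by omega
      subst hm
      rw [goA]
      simp [cnt2]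

theorem countP_eq_cnt2 (n : Nat) : ∀ m : Nat, m < 4 ^ n →
    (List.range n).countP (fun k => decide ((m >>> (2 * k)) % 4 = 2)) = cnt2 m := by
  induction n with
  | zero =>
    intro m hm
    interval_cases m
    simp [cnt2]
  | succ n ih =>
    intro m hm
    rw [List.range_succ_eq_map, List.countP_cons, List.countP_map]
    have h1 : ∀ k, (m >>> (2 * (k + 1))) = ((m / 4) >>> (2 * k)) := by
      intro k
      simp [Nat.shiftRight_eq_div_pow, Nat.div_div_eq_div_mul, pow_succ, pow_mul]
      ring_nf
    have h2 : (List.range n).countP ((fun k => decide ((m >>> (2 * k)) % 4 = 2)) ∘ (· + 1))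
        = (List.range n).countP (fun k => decide (((m / 4) >>> (2 * k)) % 4 = 2)) := by
      apply List.countP_congr
      intro k _
      simp [Function.comp, h1 k]
    rw [h2, ih (m / 4) (by
      have : m < 4 ^ n * 4 := by rw [← pow_succ]; exact hm
      omega)]
    rw [cnt2_unfold m]
    simp [Nat.shiftRight_eq_div_pow]
    by_cases h4 : m % 4 = 2 <;> simp [h4] <;> omega

theorem m_lt_four_pow (m : Nat) :
    m < 4 ^ ((PySem.Int.bitLength (m : Int) + 1) / 2) := by
  have h1 : m < 2 ^ PySem.Int.bitLength (m : Int) := by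
    have := PySem.Int.lt_two_pow_bitLength (m : Int)
    simpa using this
  calc m < 2 ^ PySem.Int.bitLength (m : Int) := h1
    _ ≤ 2 ^ (2 * ((PySem.Int.bitLength (m : Int) + 1) / 2)) := by
        apply Nat.pow_le_pow_right (by omega); omega
    _ = 4 ^ ((PySem.Int.bitLength (m : Int) + 1) / 2) := by
        rw [pow_mul]; norm_num

-- ===== VERDICT (by name: the statement is the Claim_ definition above) =====
theorem ListGetLength_spec : Claim_equal_ListGetLength := by
  intro l _
  unfold Spec_ListGetLength ListGetLength ListGetLength_alt
  by_cases hle : l ≤ 0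
  · rw [goA, if_neg (by omega), if_pos hle]
  · rw [if_neg hle]
    obtain ⟨m, hm⟩ : ∃ m : Nat, l = (m : Int) := ⟨l.toNat, by omega⟩
    subst hm
    have hm0 : 0 < m := by exact_mod_cast not_le.mp hle
    rw [goA_eq m (-1)]
    set N : Nat := (PySem.Int.bitLength (m : Int) + 1) / 2 with hN
    have hn : PySem.Int.floordiv ((PySem.Int.bitLength (m : Int) : Int) + 1) 2 = (N : Int) := by
      rw [show ((PySem.Int.bitLength (m : Int) : Int) + 1) = ((PySem.Int.bitLength (m : Int) + 1 : Nat) : Int) by push_cast; ring]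
      exact_mod_cast PySem.Int.floordiv_natCast (PySem.Int.bitLength (m : Int) + 1) 2
    simp only [hn]
    rw [PySem.List.pyRange_zero_natCast]
    have hfold : ∀ (ks : List Nat) (acc : Int),
        (ks.map (Nat.cast : Nat → Int)).foldl
          (fun acc k => if PySem.Int.mod ((m : Int) >>> (2 * k).toNat) 4 = 2 then acc + 1 else acc) acc
        = acc + (ks.countP (fun k => decide ((m >>> (2 * k)) % 4 = 2)) : Int) := by
      intro ks
      induction ks with
      | nil => intro acc; simp
      | cons k ks ihk =>
        intro acc
        simp only [List.map_cons, List.foldl_cons, List.countP_cons]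
        have hsh : ((m : Int) >>> (((2 * (k : Int)).toNat : Nat) : Int)) = ((m >>> (2 * k) : Nat) : Int) := by
          rw [show (2 * (k : Int)).toNat = 2 * k by omega]
          exact Int.shiftRight_natCast m (2 * k)
        rw [hsh]
        have hmod : PySem.Int.mod ((m >>> (2 * k) : Nat) : Int) 4 = ((m >>> (2 * k)) % 4 : Nat) := by
          exact_mod_cast PySem.Int.mod_natCast (m >>> (2 * k)) 4
        rw [hmod]
        by_cases h4 : (m >>> (2 * k)) % 4 = 2
        · rw [if_pos (by exact_mod_cast congrArg (Nat.cast : Nat → Int) h4)]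
          rw [ihk (acc + 1)]
          simp [h4]; ring
        · rw [if_neg (by exact_mod_cast fun hh => h4 (by exact_mod_cast hh))]
          rw [ihk acc]
          simp [h4]
    rw [hfold]
    rw [countP_eq_cnt2 N m (m_lt_four_pow m)]
    ring
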